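-- pv_equiv track=rewrite | github.com/anxinzhou/Two-Word-Frequency | process.py | calculated_max_distance_in_cluster
-- ===== SOURCE A (Python) =====
-- def calculated_max_distance_in_cluster(words_map):
--     dis_arr = [0]*len(words_map)
--     for i, ws in enumerate(words_map):
--         max_dis = -1
--         for j in range(len(ws) - 1):
--             for k in range(j + 1, len(ws)):
--                 dis = j ^ k
--                 if dis > max_dis:
--                     max_dis = dis
--         dis_arr[i] = max_dis
--     return dis_arr
-- ===== SOURCE B (Python) =====
-- def calculated_max_distance_in_cluster(words_map):
--     return [-1 if len(ws) < 2 else (1 << (len(ws) - 1).bit_length()) - 1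
--             for ws in words_map]
-- ===== Notes on version B (the rewrite author's own statement) =====
-- stated objective: faster
-- what changed: Replaces A's per-list O(n^2) double loop over all index pairs (j,k) maximizing j^k by the closed form -1 if n<2 else (1 << (n-1).bit_length()) - 1, computed in O(1) per list.
import Mathlib
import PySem

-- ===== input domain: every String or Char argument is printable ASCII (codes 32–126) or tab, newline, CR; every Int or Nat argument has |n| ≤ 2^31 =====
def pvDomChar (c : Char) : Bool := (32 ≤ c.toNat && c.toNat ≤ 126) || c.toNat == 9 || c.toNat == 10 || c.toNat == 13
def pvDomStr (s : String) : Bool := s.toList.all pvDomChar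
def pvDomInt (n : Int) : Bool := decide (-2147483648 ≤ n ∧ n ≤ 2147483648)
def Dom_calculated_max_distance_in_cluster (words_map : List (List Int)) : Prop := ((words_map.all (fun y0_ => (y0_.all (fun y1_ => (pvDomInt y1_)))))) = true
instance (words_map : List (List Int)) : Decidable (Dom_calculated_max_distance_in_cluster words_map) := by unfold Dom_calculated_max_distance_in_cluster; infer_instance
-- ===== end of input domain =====

-- B replaces A's quadratic scan over index pairs by a per-list closed form
-- ((1 << (n-1).bit_length()) - 1 for n ≥ 2, else -1); objective: faster (asymptotic).

-- ===== PORT A =====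
-- inner two loops of A: max_dis over j in range(len(ws)-1), k in range(j+1, len(ws)) of j ^ k
def pvAInner (ws : List Int) : Int :=
  (PySem.List.pyRange 0 ((ws.length : Int) - 1) 1).foldl (fun max_dis j =>
    (PySem.List.pyRange (j + 1) (ws.length : Int) 1).foldl (fun max_dis k =>
      let dis := PySem.Int.bxor j k
      if dis > max_dis then dis else max_dis) max_dis) (-1)

def calculated_max_distance_in_cluster (words_map : List (List Int)) : List Int :=
  (PySem.List.enumerate words_map 0).foldl
    (fun dis_arr iws => dis_arr.set iws.1.toNat (pvAInner iws.2))
    (List.replicate words_map.length (0 : Int))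

-- ===== PORT B =====
def calculated_max_distance_in_cluster_alt (words_map : List (List Int)) : List Int :=
  words_map.map (fun ws =>
    if ws.length < 2 then -1
    else ((1 : Int) <<< PySem.Int.bitLength ((ws.length : Int) - 1)) - 1)

-- ===== PRECONDITION & SPEC =====
def Spec_calculated_max_distance_in_cluster (words_map : List (List Int)) (out : List Int) : Prop := out = calculated_max_distance_in_cluster_alt words_map
instance (words_map : List (List Int)) (out : List Int) : Decidable (Spec_calculated_max_distance_in_cluster words_map out) := by unfold Spec_calculated_max_distance_in_cluster; infer_instance

-- ===== CLAIM (what is proved, stated in full; the proofs are below) =====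
def Claim_equal_calculated_max_distance_in_cluster : Prop := ∀ (words_map : List (List Int)), Dom_calculated_max_distance_in_cluster words_map → Spec_calculated_max_distance_in_cluster words_map (calculated_max_distance_in_cluster words_map)

-- ===== LEMMAS AND PROOFS =====

-- A's outer loop writes dis_arr[i] once per i: the fold over enumerate is a map
lemma pv_setfold (xs : List (List Int)) : ∀ (s : Nat) (arr : List Int),
    arr.length = s + xs.length →
    (PySem.List.enumerate xs (s : Int)).foldl
      (fun dis_arr iws => dis_arr.set iws.1.toNat (pvAInner iws.2)) arr
    = arr.take s ++ xs.map pvAInner := by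
  induction xs with
  | nil =>
    intro s arr h
    simp only [List.length_nil, Nat.add_zero] at h
    simp [PySem.List.enumerate_nil, List.take_of_length_le (le_of_eq h)]
  | cons x xs ih =>
    intro s arr h
    have hs : s < arr.length := by simp at h; omega
    rw [PySem.List.enumerate_cons]
    simp only [List.foldl_cons, Int.toNat_natCast]
    have : ((s : Int) + 1) = ((s + 1 : Nat) : Int) := by push_cast; ring
    rw [this, ih (s + 1) (arr.set s (pvAInner x)) (by simp at h ⊢; omega)]
    have htake : (arr.set s (pvAInner x)).take (s + 1) = arr.take s ++ [pvAInner x] := by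
      rw [List.set_eq_take_append_cons_drop, if_pos hs, List.take_append]
      have hlen : (arr.take s).length = s := by simp; omega
      rw [List.take_of_length_le (by omega), hlen]
      simp
    rw [htake]
    simp

lemma pv_ifmax (a b : Int) : (if b > a then b else a) = max a b := by
  rw [max_def]; split_ifs <;> omega

-- nested max-folds flatten to one fold over the concatenated values
lemma pv_nest (F : Int → List Int) : ∀ (J : List Int) (m : Int),
    J.foldl (fun m j => (F j).foldl max m) m = (J.flatMap F).foldl max m := by
  intro J
  induction J with
  | nil => simp
  | cons j J ih => intro m; simp [List.foldl_append, ih]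

lemma pv_inner_flat (ws : List Int) :
    pvAInner ws
    = ((PySem.List.pyRange 0 ((ws.length : Int) - 1) 1).flatMap (fun j =>
        (PySem.List.pyRange (j + 1) (ws.length : Int) 1).map (fun k => PySem.Int.bxor j k))).foldl
        max (-1) := by
  unfold pvAInner
  have hstep : ∀ (j m : Int),
      (PySem.List.pyRange (j + 1) (ws.length : Int) 1).foldl (fun max_dis k =>
        let dis := PySem.Int.bxor j k
        if dis > max_dis then dis else max_dis) m
      = ((PySem.List.pyRange (j + 1) (ws.length : Int) 1).map
          (fun k => PySem.Int.bxor j k)).foldl max m := by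
    intro j m
    rw [List.foldl_map]
    congr 1
    funext a k
    show (if PySem.Int.bxor j k > a then PySem.Int.bxor j k else a) = max a (PySem.Int.bxor j k)
    exact pv_ifmax a (PySem.Int.bxor j k)
  simp only [hstep]
  exact pv_nest _ _ _

lemma pv_foldl_max_le {c : Int} : ∀ (L : List Int) (a : Int),
    a ≤ c → (∀ x ∈ L, x ≤ c) → L.foldl max a ≤ c := by
  intro L
  induction L with
  | nil => intro a ha _; simpa using ha
  | cons x L ih =>
    intro a ha hall
    simp only [List.foldl_cons]
    exact ih _ (max_le ha (hall x (by simp))) (fun y hy => hall y (by simp [hy]))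

-- the one per-word fact: A's inner loops compute B's closed form
lemma pv_inner_eq (ws : List Int) :
    pvAInner ws
    = if ws.length < 2 then -1
      else ((1 : Int) <<< PySem.Int.bitLength ((ws.length : Int) - 1)) - 1 := by
  by_cases hn : ws.length < 2
  · rw [if_pos hn]
    unfold pvAInner
    interval_cases h : ws.length <;> simp_all [PySem.List.pyRange_one_eq_nil]
  · rw [if_neg hn]
    rw [not_lt] at hn
    set n := ws.length with hn_def
    set b := PySem.Int.bitLength ((n : Int) - 1) with hb_def
    have habs : ((n : Int) - 1).natAbs = n - 1 := by omega
    have hlt : n - 1 < 2 ^ b := by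
      have h := PySem.Int.lt_two_pow_bitLength ((n : Int) - 1)
      rw [habs] at h; exact h
    have hle : 2 ^ (b - 1) ≤ n - 1 := by
      have h := PySem.Int.two_pow_bitLength_le ((n : Int) - 1) (by omega)
      rw [habs] at h; exact h
    have hb1 : 1 ≤ b := by
      by_contra h
      have : b = 0 := by omega
      rw [this] at hlt; simp at hlt; omega
    have hshift : ((1 : Int) <<< b) = (2 : Int) ^ b := by
      rw [Int.shiftLeft_eq, one_mul]
    have h2b : (1 : Int) ≤ 2 ^ b := one_le_pow₀ (by omega)
    rw [pv_inner_flat, hshift]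
    apply le_antisymm
    · -- every j ^ k with j, k < n is below 2^b
      apply pv_foldl_max_le _ _ (by omega)
      intro x hx
      rw [List.mem_flatMap] at hx
      obtain ⟨j, hj, hx⟩ := hx
      rw [List.mem_map] at hx
      obtain ⟨k, hk, rfl⟩ := hx
      rw [PySem.List.mem_pyRange_one] at hj hk
      have hj0 : 0 ≤ j := hj.1
      have hk0 : 0 ≤ k := by omega
      rw [← Int.toNat_of_nonneg hj0, ← Int.toNat_of_nonneg hk0, PySem.Int.bxor_natCast]
      have hxor : j.toNat ^^^ k.toNat < 2 ^ b :=
        Nat.xor_lt_two_pow (by omega) (by omega)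
      have : ((j.toNat ^^^ k.toNat : Nat) : Int) < (2 : Int) ^ b := by
        calc ((j.toNat ^^^ k.toNat : Nat) : Int) < ((2 ^ b : Nat) : Int) := by
              exact_mod_cast hxor
          _ = (2 : Int) ^ b := by push_cast; ring
      omega
    · -- the pair j = 2^(b-1) - 1, k = 2^(b-1) attains 2^b - 1
      have hwit : ((2 ^ (b - 1) - 1 : Nat) : Int) ∈ PySem.List.pyRange 0 ((n : Int) - 1) 1 := by
        rw [PySem.List.mem_pyRange_one]
        constructor
        · positivity
        · have h1 : 1 ≤ 2 ^ (b - 1) := Nat.one_le_two_pow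
          omega
      have hwit2 : ((2 ^ (b - 1) : Nat) : Int)
          ∈ PySem.List.pyRange (((2 ^ (b - 1) - 1 : Nat) : Int) + 1) (n : Int) 1 := by
        rw [PySem.List.mem_pyRange_one]
        have h1 : 1 ≤ 2 ^ (b - 1) := Nat.one_le_two_pow
        constructor <;> omega
      have hmem : PySem.Int.bxor ((2 ^ (b - 1) - 1 : Nat) : Int) ((2 ^ (b - 1) : Nat) : Int)
          ∈ (PySem.List.pyRange 0 ((n : Int) - 1) 1).flatMap (fun j =>
            (PySem.List.pyRange (j + 1) (ws.length : Int) 1).map (fun k => PySem.Int.bxor j k)) := by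
        rw [List.mem_flatMap]
        exact ⟨_, hwit, List.mem_map.mpr ⟨_, by rw [← hn_def]; exact hwit2, rfl⟩⟩
      have hval : PySem.Int.bxor ((2 ^ (b - 1) - 1 : Nat) : Int) ((2 ^ (b - 1) : Nat) : Int)
          = (2 : Int) ^ b - 1 := by
        rw [PySem.Int.bxor_natCast]
        have hx : (2 ^ (b - 1) - 1) ^^^ 2 ^ (b - 1) = 2 ^ b - 1 := by
          apply Nat.eq_of_testBit_eq
          intro i
          simp only [Nat.testBit_xor, Nat.testBit_two_pow_sub_one, Nat.testBit_two_pow]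
          by_cases h1 : i < b - 1 <;> by_cases h2 : b - 1 = i <;> by_cases h3 : i < b <;>
            simp [h1, h2, h3] <;> omega
        rw [hx]
        have : 1 ≤ 2 ^ b := Nat.one_le_two_pow
        push_cast [this]
        ring_nf
      have := (PySem.List.le_foldl_max ((PySem.List.pyRange 0 ((ws.length : Int) - 1) 1).flatMap
        (fun j => (PySem.List.pyRange (j + 1) (ws.length : Int) 1).map
          (fun k => PySem.Int.bxor j k))) (-1)).2 _ (by rw [← hn_def] at hmem ⊢; exact hmem)
      rw [hval] at this
      omega

-- ===== VERDICT (by name: the statement is the Claim_ definition above) =====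
theorem calculated_max_distance_in_cluster_spec : Claim_equal_calculated_max_distance_in_cluster := by
  intro words_map _
  unfold Spec_calculated_max_distance_in_cluster
  unfold calculated_max_distance_in_cluster calculated_max_distance_in_cluster_alt
  have h := pv_setfold words_map 0 (List.replicate words_map.length (0 : Int)) (by simp)
  simp only [Nat.cast_zero, List.take_zero, List.nil_append] at h
  rw [h]
  exact List.map_congr_left (fun ws _ => pv_inner_eq ws)
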